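-- pv_equiv track=rewrite | github.com/dem-ola/examples | scrape.py | is_meta
-- ===== SOURCE A (Python) =====
-- def is_meta(txt,metas,tags):
-- 	''' is txt mainly metas or tags '''
--
-- 	is_ = False
-- 	meta_count, meta_max 	= 0, 2
-- 	tag_count, tag_max 		= 0, 3
-- 	txt = txt.split()
--
-- 	for t in txt:
-- 		if t in metas:
-- 			meta_count += 1
-- 		if meta_count >= meta_max:
-- 			is_ = True
-- 			break
--
-- 		if t in tags:
-- 			tag_count += 1
-- 		if tag_count >= tag_max:
-- 			is_ = True
-- 			break
-- 	return is_
-- ===== SOURCE B (Python) =====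
-- def is_meta(txt, metas, tags):
--     ''' is txt mainly metas or tags '''
--     # Build a frequency table of the words once, then tally each DISTINCT
--     # word's membership a single time, weighted by its multiplicity.
--     freq = {}
--     for w in txt.split():
--         freq[w] = freq.get(w, 0) + 1
--     meta_total = 0
--     tag_total = 0
--     for w, c in freq.items():
--         if w in metas:
--             meta_total += c
--         if w in tags:
--             tag_total += c
--     return meta_total >= 2 or tag_total >= 3
-- ===== Notes on version B (the rewrite author's own statement) =====
-- stated objective: alternative
-- what changed: Replaces A's interleaved early-exit scan (two running counters with per-iteration threshold checks and break) by a two-stage frequency-table algorithm: build a word->count dict in one pass, then test membership once per DISTINCT word (weighted by its count) and compare the two totals against the thresholds once at the end.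
import Mathlib
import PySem

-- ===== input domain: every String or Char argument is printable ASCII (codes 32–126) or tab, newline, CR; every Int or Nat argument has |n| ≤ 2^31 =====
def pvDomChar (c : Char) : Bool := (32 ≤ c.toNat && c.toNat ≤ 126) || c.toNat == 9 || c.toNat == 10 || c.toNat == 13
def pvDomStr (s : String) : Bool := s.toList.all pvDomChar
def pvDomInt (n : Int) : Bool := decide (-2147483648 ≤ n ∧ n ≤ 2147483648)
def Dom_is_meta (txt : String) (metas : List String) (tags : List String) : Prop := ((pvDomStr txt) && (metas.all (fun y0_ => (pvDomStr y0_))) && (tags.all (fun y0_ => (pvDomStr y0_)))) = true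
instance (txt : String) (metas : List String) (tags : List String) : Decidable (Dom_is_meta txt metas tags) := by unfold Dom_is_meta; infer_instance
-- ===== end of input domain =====

-- B replaces A's interleaved early-exit scan by a two-stage frequency-table algorithm:
-- build a word->count dict once, tally membership once per distinct word, compare at the end.

-- ===== PORT A =====
-- A's for-loop with two counters, per-iteration threshold checks and break.
def isMetaLoop (metas tags : List String) : List String → Nat → Nat → Bool
  | [], _, _ => false
  | t :: rest, meta_count, tag_count =>
    let meta_count := if metas.contains t then meta_count + 1 else meta_count
    if meta_count ≥ 2 then true
    else
      let tag_count := if tags.contains t then tag_count + 1 else tag_count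
      if tag_count ≥ 3 then true
      else isMetaLoop metas tags rest meta_count tag_count

def is_meta (txt : String) (metas : List String) (tags : List String) : Bool :=
  isMetaLoop metas tags (PySem.Str.split₀ txt) 0 0

-- ===== PORT B =====
def is_meta_alt (txt : String) (metas : List String) (tags : List String) : Bool :=
  -- freq = {}; for w in txt.split(): freq[w] = freq.get(w, 0) + 1
  let freq := (PySem.Str.split₀ txt).foldl
      (fun d w => d.insert w (d.getD w 0 + 1)) (PySem.Dict.empty : PySem.Dict String Int)
  -- for w, c in freq.items(): tally the two totals
  let totals := freq.items.foldl
      (fun (p : Int × Int) wc =>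
        (if metas.contains wc.1 then p.1 + wc.2 else p.1,
         if tags.contains wc.1 then p.2 + wc.2 else p.2)) (0, 0)
  decide (totals.1 ≥ 2) || decide (totals.2 ≥ 3)

-- ===== PRECONDITION & SPEC =====
def Spec_is_meta (txt : String) (metas : List String) (tags : List String) (out : Bool) : Prop := out = is_meta_alt txt metas tags
instance (txt : String) (metas : List String) (tags : List String) (out : Bool) : Decidable (Spec_is_meta txt metas tags out) := by unfold Spec_is_meta; infer_instance

-- ===== CLAIM (what is proved, stated in full; the proofs are below) =====
def Claim_equal_is_meta : Prop := ∀ (txt : String) (metas : List String) (tags : List String), Dom_is_meta txt metas tags → Spec_is_meta txt metas tags (is_meta txt metas tags)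

-- ===== LEMMAS AND PROOFS =====

theorem bool_ext {a b : Bool} (h : a = true ↔ b = true) : a = b := by
  cases a <;> cases b <;> simp_all

-- A's loop, fully run, decides the two filter-lengths against the thresholds.
theorem isMetaLoop_eq (metas tags : List String) (ws : List String) :
    ∀ mc tc : Nat, mc < 2 → tc < 3 →
    isMetaLoop metas tags ws mc tc =
      (decide (mc + (ws.filter (fun w => metas.contains w)).length ≥ 2) ||
       decide (tc + (ws.filter (fun w => tags.contains w)).length ≥ 3)) := by
  induction ws with
  | nil => intro mc tc h1 h2; simp [isMetaLoop]; omega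
  | cons t rest ih =>
    intro mc tc h1 h2
    cases hm : metas.contains t <;> cases ht : tags.contains t <;>
      simp only [isMetaLoop, List.filter_cons, hm, ht, if_true, if_false,
                 Bool.false_eq_true, List.length_cons] <;>
      split_ifs <;>
      first
        | (apply bool_ext;
           simp only [Bool.or_eq_true, decide_eq_true_eq, List.length_cons,
                      true_iff]; omega)
        | (rw [ih _ _ (by omega) (by omega)]; apply bool_ext;
           simp only [Bool.or_eq_true, decide_eq_true_eq, List.length_cons,
                      true_iff]; omega)
        | rw [ih _ _ (by omega) (by omega)]

-- B's tallying fold over a list of (word, count) pairs is a pair of filtered sums.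
theorem tally_fold (metas tags : List String) (L : List (String × Int)) :
    ∀ a b : Int,
    L.foldl (fun (p : Int × Int) wc =>
        (if metas.contains wc.1 then p.1 + wc.2 else p.1,
         if tags.contains wc.1 then p.2 + wc.2 else p.2)) (a, b) =
      (a + ((L.filter (fun wc => metas.contains wc.1)).map (·.2)).sum,
       b + ((L.filter (fun wc => tags.contains wc.1)).map (·.2)).sum) := by
  induction L with
  | nil => intro a b; simp
  | cons wc rest ih =>
    intro a b
    simp only [List.foldl_cons, List.filter_cons]
    split_ifs with hm ht ht <;>
      simp only [ih, List.map_cons, List.sum_cons, Prod.mk.injEq] <;>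
      first
        | rfl
        | exact ⟨by omega, trivial⟩
        | exact ⟨trivial, by omega⟩
        | exact ⟨by omega, by omega⟩

-- Summing each distinct word's multiplicity over those in the collection
-- equals the length of the plain membership filter.
theorem sum_counts_eq (q : String → Bool) (ws : List String) :
    (((PySem.Set.ofList ws).filter q).map (fun w => (ws.count w : Int))).sum =
      ((ws.filter q).length : Int) := by
  have hperm : List.Perm (PySem.Set.ofList ws) ws.dedup := by
    apply (List.perm_ext_iff_of_nodup (PySem.Set.nodup_ofList ws) ws.nodup_dedup).mpr
    intro x; rw [PySem.Set.mem_ofList, List.mem_dedup]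
  have h1 : (((PySem.Set.ofList ws).filter q).map (fun w => (ws.count w : Int))).sum =
      ((( ws.dedup).filter q).map (fun w => (ws.count w : Int))).sum :=
    ((hperm.filter q).map _).sum_eq
  rw [h1]
  have h2 := List.sum_map_count_dedup_filter_eq_countP q ws
  rw [List.countP_eq_length_filter] at h2
  calc (((ws.dedup).filter q).map (fun w => (ws.count w : Int))).sum
      = ((((ws.dedup).filter q).map ws.count).map (Nat.cast : Nat → Int)).sum := by
        rw [List.map_map]; rfl
    _ = ((((ws.dedup).filter q).map ws.count).sum : Int) := by
        rw [Nat.cast_list_sum]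
    _ = ((ws.filter q).length : Int) := by rw [h2]

-- ===== VERDICT (by name: the statement is the Claim_ definition above) =====
theorem is_meta_spec : Claim_equal_is_meta := by
  intro txt metas tags _
  unfold Spec_is_meta is_meta is_meta_alt
  rw [isMetaLoop_eq metas tags _ 0 0 (by omega) (by omega)]
  simp only [PySem.Dict.foldl_insert_getD_add_one_eq_counter, PySem.Dict.items_counter]
  rw [tally_fold]
  simp only [List.filter_map, List.map_map, Function.comp_def]
  rw [sum_counts_eq, sum_counts_eq]
  apply bool_ext
  simp only [Bool.or_eq_true, decide_eq_true_eq]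
  omega
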